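-- pv_equiv track=rewrite | github.com/ovalb/AdventOfCode2023 | 2024/day7/sol.py | cartesian_product
-- ===== SOURCE A (Python) =====
-- def cartesian_product(symbols, length):
--     products = [[]]
--
--     for _ in range(length):
--         new_result = []
--         for p in products:
--             for s in symbols:
--                 new_result.append(p+[s])
--         products = new_result
--     return tuple(products)
--
-- products = {}
-- ===== SOURCE B (Python) =====
-- def cartesian_product(symbols, length):
--     if length <= 0:
--         return ([],)
--     prev = cartesian_product(symbols, length - 1)
--     return tuple(p + [s] for p in prev for s in symbols)
-- ===== Notes on version B (the rewrite author's own statement) =====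
-- stated objective: simpler
-- what changed: Replaced the iterative rebuild loop with accumulator lists by a recursion on length that extends each prefix of the (length-1) product with every symbol.
import Mathlib
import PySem

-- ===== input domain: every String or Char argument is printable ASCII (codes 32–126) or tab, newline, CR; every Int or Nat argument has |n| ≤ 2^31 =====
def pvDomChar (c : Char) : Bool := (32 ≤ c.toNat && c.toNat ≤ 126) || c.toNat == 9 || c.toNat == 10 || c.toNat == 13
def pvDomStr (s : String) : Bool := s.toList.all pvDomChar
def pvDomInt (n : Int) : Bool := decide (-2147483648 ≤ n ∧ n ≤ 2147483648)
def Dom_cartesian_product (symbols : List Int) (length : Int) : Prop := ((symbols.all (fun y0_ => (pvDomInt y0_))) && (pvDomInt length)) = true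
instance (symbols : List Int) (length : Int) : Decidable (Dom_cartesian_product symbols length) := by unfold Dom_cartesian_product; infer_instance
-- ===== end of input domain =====

-- B rebuilds the product by recursion on length (extend each shorter tuple by every symbol)
-- instead of A's iterative loop with an explicit accumulator; same cost, simpler.

-- ===== PORT A =====
-- products = [[]]; for _ in range(length): new_result = []; for p in products: for s in symbols:
-- new_result.append(p+[s]); products = new_result; return tuple(products)
def cartesian_product (symbols : List Int) (length : Int) : List (List Int) :=
  (PySem.List.pyRange 0 length 1).foldl
    (fun products _ =>
      products.foldl (fun new_result p =>
        symbols.foldl (fun new_result s => new_result ++ [p ++ [s]]) new_result) [])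
    [[]]

-- ===== PORT B =====
def cartesian_product_alt (symbols : List Int) (length : Int) : List (List Int) :=
  if length ≤ 0 then [[]]
  else (cartesian_product_alt symbols (length - 1)).flatMap
         (fun p => symbols.map (fun s => p ++ [s]))
termination_by length.toNat
decreasing_by omega

-- ===== PRECONDITION & SPEC =====
def Spec_cartesian_product (symbols : List Int) (length : Int) (out : List (List Int)) : Prop := out = cartesian_product_alt symbols length
instance (symbols : List Int) (length : Int) (out : List (List Int)) : Decidable (Spec_cartesian_product symbols length out) := by unfold Spec_cartesian_product; infer_instance

-- ===== CLAIM (what is proved, stated in full; the proofs are below) =====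
def Claim_equal_cartesian_product : Prop := ∀ (symbols : List Int) (length : Int), Dom_cartesian_product symbols length → Spec_cartesian_product symbols length (cartesian_product symbols length)

-- ===== LEMMAS AND PROOFS =====

-- one pass over the symbols appends the extensions of prefix p
theorem inner_foldl (symbols : List Int) (p : List Int) (acc : List (List Int)) :
    symbols.foldl (fun nr s => nr ++ [p ++ [s]]) acc
      = acc ++ symbols.map (fun s => p ++ [s]) := by
  induction symbols generalizing acc with
  | nil => simp
  | cons s rest ih => simp [List.foldl, ih]

-- the body of A's outer loop is exactly B's flatMap step
theorem step_foldl (symbols : List Int) (products acc : List (List Int)) :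
    products.foldl (fun nr p => symbols.foldl (fun nr s => nr ++ [p ++ [s]]) nr) acc
      = acc ++ products.flatMap (fun p => symbols.map (fun s => p ++ [s])) := by
  induction products generalizing acc with
  | nil => simp
  | cons p rest ih =>
      rw [List.foldl_cons, inner_foldl, ih, List.flatMap_cons, List.append_assoc]

-- A's fold over range(length) ignores the loop variable: only the count matters,
-- and each pass is B's flatMap step
theorem foldl_body_iterate (symbols : List Int) (l : List Int) (init : List (List Int)) :
    l.foldl (fun ps _ =>
        ps.foldl (fun nr p => symbols.foldl (fun nr s => nr ++ [p ++ [s]]) nr) []) init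
      = (fun ps => ps.flatMap (fun p => symbols.map (fun s => p ++ [s])))^[l.length] init := by
  induction l generalizing init with
  | nil => simp
  | cons _ rest ih =>
      rw [List.foldl_cons, ih, List.length_cons, Function.iterate_succ_apply]
      have h := step_foldl symbols init []
      simp only [List.nil_append] at h
      rw [h]

theorem alt_iterate (symbols : List Int) (n : Nat) :
    cartesian_product_alt symbols (n : Int)
      = (fun ps => ps.flatMap (fun p => symbols.map (fun s => p ++ [s])))^[n] [[]] := by
  induction n with
  | zero => simp [cartesian_product_alt]
  | succ k ih =>
      rw [cartesian_product_alt]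
      have h : ¬ ((k : Int) + 1 ≤ 0) := by omega
      simp only [Nat.cast_add, Nat.cast_one, if_neg h, add_sub_cancel_right, ih,
        Function.iterate_succ_apply']

-- ===== VERDICT (by name: the statement is the Claim_ definition above) =====
theorem cartesian_product_spec : Claim_equal_cartesian_product := by
  intro symbols length _
  unfold Spec_cartesian_product
  unfold cartesian_product
  rw [foldl_body_iterate, PySem.List.length_pyRange_one]
  by_cases h : length ≤ 0
  · have : (length - 0).toNat = 0 := by omega
    rw [this]
    simp [cartesian_product_alt, h]
  · have hl : ((length.toNat : Nat) : Int) = length := by omega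
    have : (length - 0).toNat = length.toNat := by omega
    rw [this, ← alt_iterate, hl]
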